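-- pv_equiv track=rewrite | github.com/bhrdj/el_documents | scripts/lib/bullet_detection.py | detect_continuation_lines
-- ===== SOURCE A (Python) =====
-- from typing import List, Tuple, Optional
--
-- def is_list_item(line: str) -> bool:
--     """Check if a line is a bullet list item.
--
--     Args:
--         line: Line to check
--
--     Returns:
--         True if line is a bullet list item
--     """
--     stripped = line.lstrip()
--     if not stripped:
--         return False
--
--     # Check for bullet markers: -, *, +
--     return stripped[0] in ['-', '*', '+'] and (len(stripped) == 1 or stripped[1] == ' ')
--
-- def count_leading_spaces(line: str) -> int:
--     """Count leading spaces in a line.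
--
--     Args:
--         line: Line to analyze
--
--     Returns:
--         Number of leading spaces
--     """
--     if not line:
--         return 0
--
--     count = 0
--     for char in line:
--         if char == ' ':
--             count += 1
--         elif char == '\t':
--             # Convert tabs to 4 spaces
--             count += 4
--         else:
--             break
--
--     return count
--
-- def detect_continuation_lines(lines: List[str], list_start: int, list_end: int) -> List[Tuple[int, bool]]:
--     """Detect which lines in a list block are continuation lines vs. new items.
--
--     Args:
--         lines: All document lines
--         list_start: Start index of list block
--         list_end: End index of list block
--
--     Returns:
--         List of (line_index, is_continuation) tuples
--     """
--     result = []
--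
--     for i in range(list_start, list_end + 1):
--         line = lines[i]
--
--         if is_list_item(line):
--             # This is a list item
--             result.append((i, False))
--         elif line.strip() == '':
--             # Blank line - could be within or between items
--             result.append((i, False))
--         else:
--             # Non-blank, non-list-item line - likely continuation
--             # Check indentation relative to previous list item
--             prev_item_indent = None
--             for j in range(i - 1, list_start - 1, -1):
--                 if is_list_item(lines[j]):
--                     prev_item_indent = count_leading_spaces(lines[j])
--                     break
--
--             is_continuation = False
--             if prev_item_indent is not None:
--                 current_indent = count_leading_spaces(line)
--                 # Continuation if indented more than the list item
--                 is_continuation = current_indent > prev_item_indent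
--
--             result.append((i, is_continuation))
--
--     return result
-- ===== SOURCE B (Python) =====
-- from typing import List, Tuple, Optional
--
-- def _tag(line: str) -> Tuple[int, int]:
--     """Classify a line: (0, indent) list item, (1, indent) blank, (2, indent) text."""
--     ws = []
--     for ch in line:
--         if ch not in ' \t':
--             break
--         ws.append(ch)
--     indent = ws.count(' ') + 4 * ws.count('\t')
--     head = line.lstrip()[:2]
--     if head in ('-', '*', '+', '- ', '* ', '+ '):
--         return (0, indent)
--     if line.strip() == '':
--         return (1, indent)
--     return (2, indent)
--
-- def detect_continuation_lines(lines: List[str], list_start: int, list_end: int) -> List[Tuple[int, bool]]: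
--     """Staged passes: tag every line once, scan once for the governing item indent, then zip."""
--     rng = range(list_start, list_end + 1)
--     tags = [_tag(lines[i]) for i in rng]
--     lasts = []
--     cur = None
--     for kind, indent in tags:
--         lasts.append(cur)
--         if kind == 0:
--             cur = indent
--     return [(i, kind == 2 and last is not None and indent > last)
--             for (i, ((kind, indent), last)) in zip(rng, zip(tags, lasts))]
-- ===== Notes on version B (the rewrite author's own statement) =====
-- stated objective: alternative
-- what changed: Replaces A's per-line inner backward scan for the previous item's indentation with three staged passes: tag every line once (item/blank/text plus indent), one forward scan precomputing the governing item indent per line, and a zip producing the pairs.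
import Mathlib
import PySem

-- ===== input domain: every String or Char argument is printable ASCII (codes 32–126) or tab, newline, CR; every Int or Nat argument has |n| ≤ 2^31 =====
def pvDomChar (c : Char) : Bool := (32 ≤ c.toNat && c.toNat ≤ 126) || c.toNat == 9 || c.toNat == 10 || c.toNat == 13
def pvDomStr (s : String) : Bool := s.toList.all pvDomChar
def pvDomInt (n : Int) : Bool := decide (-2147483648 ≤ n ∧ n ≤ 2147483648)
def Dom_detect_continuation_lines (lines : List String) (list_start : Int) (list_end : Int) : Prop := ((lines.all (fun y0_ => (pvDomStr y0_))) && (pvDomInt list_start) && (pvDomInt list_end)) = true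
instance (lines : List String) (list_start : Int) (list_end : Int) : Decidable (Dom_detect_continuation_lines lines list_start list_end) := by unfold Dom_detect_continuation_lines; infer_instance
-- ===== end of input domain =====

-- B replaces A's inner backward scan by three staged passes (tag lines, precompute the governing
-- item indent, zip); same return values.


-- ===== PORT A =====
-- shared module helper: is_list_item
def is_list_item (line : String) : Bool :=
  let stripped := PySem.Str.lstrip line
  if PySem.Str.len stripped = 0 then false
  else ((PySem.List.pyGet? stripped.toList 0).any (fun c => c ∈ ['-', '*', '+'])) &&
       (PySem.Str.len stripped = 1 || (PySem.List.pyGet? stripped.toList 1).any (fun c => c = ' '))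

-- module helper: count_leading_spaces (the for-loop with break, as structural recursion)
def clsLoop : List Char → Int → Int
  | [], count => count
  | c :: rest, count =>
      if c = ' ' then clsLoop rest (count + 1)
      else if c = '\t' then clsLoop rest (count + 4)
      else count

def count_leading_spaces (line : String) : Int :=
  if PySem.Str.len line = 0 then 0 else clsLoop line.toList 0

-- loop body of A (one iteration of the outer for-loop; inner backward scan with break = find?)
def pvStepA (lines : List String) (list_start : Int) (result : List (Int × Bool)) (i : Int) :
    List (Int × Bool) :=
  let line := PySem.List.pyGetD lines i ""   -- lines[i]; IndexError excluded by Pre_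
  if is_list_item line then result ++ [(i, false)]
  else if PySem.Str.strip line = "" then result ++ [(i, false)]
  else
    let prev_item_indent : Option Int :=
      ((PySem.List.pyRange (i - 1) (list_start - 1) (-1)).find?
          (fun j => is_list_item (PySem.List.pyGetD lines j ""))).map
        (fun j => count_leading_spaces (PySem.List.pyGetD lines j ""))
    let is_continuation : Bool :=
      match prev_item_indent with
      | none => false
      | some p => decide (count_leading_spaces line > p)
    result ++ [(i, is_continuation)]

def detect_continuation_lines (lines : List String) (list_start : Int) (list_end : Int) :
    List (Int × Bool) :=
  (PySem.List.pyRange list_start (list_end + 1) 1).foldl (pvStepA lines list_start) []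

-- ===== PORT B =====
-- B helper _tag: classify a line as (0, indent) item / (1, indent) blank / (2, indent) text
def pvTagB (line : String) : Int × Int :=
  -- the for/break loop collecting the leading run of ' '/'\t' is takeWhile (exact)
  let ws := line.toList.takeWhile (fun c => c = ' ' || c = '\t')
  let indent : Int := (ws.count ' ' : Int) + 4 * (ws.count '\t' : Int)
  -- line.lstrip()[:2] taken on code points (exact for these ASCII markers)
  let head := PySem.List.slice (PySem.Str.lstrip line).toList none (some 2)
  if head ∈ [['-'], ['*'], ['+'], ['-', ' '], ['*', ' '], ['+', ' ']] then (0, indent)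
  else if PySem.Str.strip line = "" then (1, indent)
  else (2, indent)

-- B pass 2: the loop appending the current governing indent before updating it
def pvLasts : List (Int × Int) → Option Int → List (Option Int)
  | [], _ => []
  | (kind, indent) :: rest, cur =>
      cur :: pvLasts rest (if kind = 0 then some indent else cur)

def detect_continuation_lines_alt (lines : List String) (list_start : Int) (list_end : Int) :
    List (Int × Bool) :=
  let rng := PySem.List.pyRange list_start (list_end + 1) 1
  let tags := rng.map (fun i => pvTagB (PySem.List.pyGetD lines i ""))  -- lines[i]; see Pre_
  let lasts := pvLasts tags none
  (rng.zip (tags.zip lasts)).map (fun p =>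
    (p.1, (p.2.1.1 == 2) &&
      (match p.2.2 with | none => false | some last => decide (p.2.1.2 > last))))

-- ===== PRECONDITION & SPEC =====
-- Pre_ excludes exactly the inputs on which Python A raises IndexError: some index in
-- [list_start, list_end] is outside Python's (negative-index-allowing) range of `lines`.
def Pre_detect_continuation_lines (lines : List String) (list_start : Int) (list_end : Int) : Prop :=
  list_end < list_start ∨
    (-(lines.length : Int) ≤ list_start ∧ list_end < (lines.length : Int))

instance (lines : List String) (list_start : Int) (list_end : Int) :
    Decidable (Pre_detect_continuation_lines lines list_start list_end) := by
  unfold Pre_detect_continuation_lines; infer_instance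

def pvWitness_detect_continuation_lines : List String × Int × Int :=
  (["- a", "  b", "", "c"], 0, 3)

def Spec_detect_continuation_lines (lines : List String) (list_start : Int) (list_end : Int) (out : List (Int × Bool)) : Prop := out = detect_continuation_lines_alt lines list_start list_end
instance (lines : List String) (list_start : Int) (list_end : Int) (out : List (Int × Bool)) : Decidable (Spec_detect_continuation_lines lines list_start list_end out) := by unfold Spec_detect_continuation_lines; infer_instance

-- ===== CLAIM (what is proved, stated in full; the proofs are below) =====
def Claim_equal_detect_continuation_lines : Prop := ∀ (lines : List String) (list_start : Int) (list_end : Int), Dom_detect_continuation_lines lines list_start list_end → Pre_detect_continuation_lines lines list_start list_end → Spec_detect_continuation_lines lines list_start list_end (detect_continuation_lines lines list_start list_end)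

-- ===== LEMMAS AND PROOFS =====

-- The weighted count of the leading run of spaces/tabs is what clsLoop computes.
lemma clsLoop_weight : ∀ (l : List Char) (acc : Int),
    clsLoop l acc = acc + ((l.takeWhile (fun c => c = ' ' || c = '\t')).count ' ' : Int)
      + 4 * ((l.takeWhile (fun c => c = ' ' || c = '\t')).count '\t' : Int) := by
  intro l
  induction l with
  | nil => intro acc; simp [clsLoop]
  | cons c rest ih =>
      intro acc
      by_cases hs : c = ' '
      · subst hs; simp [clsLoop, List.takeWhile, ih]; ring
      · by_cases ht : c = '\t'
        · subst ht; simp [clsLoop, List.takeWhile, ih, hs]; ring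
        · simp [clsLoop, List.takeWhile, hs, ht]

-- list-level form of the two-character membership test
lemma head_take2 : ∀ (l : List Char),
    (l.take 2 ∈ [['-'], ['*'], ['+'], ['-', ' '], ['*', ' '], ['+', ' ']]) ↔
      (if l.length = 0 then false
       else ((PySem.List.pyGet? l 0).any (fun c => c ∈ ['-', '*', '+'])) &&
            (l.length = 1 || (PySem.List.pyGet? l 1).any (fun c => c = ' '))) = true
  | [] => by simp
  | [c] => by
      simp [PySem.List.pyGet?, PySem.List.pyIdx?]
  | c :: d :: rest => by
      have hif : ((0 : Int) ≤ (rest.length : Int) + 1) := by positivity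
      simp [PySem.List.pyGet?, PySem.List.pyIdx?, List.take, hif]
      constructor
      · rintro (⟨h1, h2⟩ | ⟨h1, h2⟩ | ⟨h1, h2⟩) <;> simp [h1, h2]
      · rintro ⟨h1, h2⟩
        rcases h1 with h1 | h1 | h1 <;> simp [h1, h2]

-- B's head-of-stripped-line membership test is A's is_list_item.
lemma head_mem_iff (line : String) :
    (PySem.List.slice (PySem.Str.lstrip line).toList none (some 2)
        ∈ [['-'], ['*'], ['+'], ['-', ' '], ['*', ' '], ['+', ' ']]) ↔
      is_list_item line = true := by
  unfold is_list_item
  rw [show ((2 : Int)) = ((2 : Nat) : Int) from rfl, PySem.List.slice_to_natCast,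
      head_take2]
  simp [PySem.Str.len_eq]

-- pvTagB in terms of A's helpers.
lemma pvTagB_eq (line : String) :
    pvTagB line =
      ((if is_list_item line then 0 else if PySem.Str.strip line = "" then 1 else 2 : Int),
        count_leading_spaces line) := by
  have hw : ((line.toList.takeWhile (fun c => c = ' ' || c = '\t')).count ' ' : Int)
      + 4 * ((line.toList.takeWhile (fun c => c = ' ' || c = '\t')).count '\t' : Int)
      = count_leading_spaces line := by
    unfold count_leading_spaces
    by_cases h0 : PySem.Str.len line = 0
    · have hnil : line.toList = [] := by
        have h := h0; simp only [PySem.Str.len_eq] at h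
        exact List.length_eq_zero_iff.mp (by exact_mod_cast h)
      simp [hnil]
    · rw [if_neg h0, clsLoop_weight]; ring
  unfold pvTagB
  by_cases hitem : is_list_item line
  · rw [if_pos ((head_mem_iff line).mpr hitem), if_pos hitem]
    simp [hw]
  · rw [if_neg (fun h => hitem ((head_mem_iff line).mp h)), if_neg hitem]
    split_ifs <;> simp [hw]

-- fused form of B's passes 2+3 (proof device only)
def emitRec (lines : List String) : List Int → Option Int → List (Int × Bool)
  | [], _ => []
  | i :: rest, cur =>
      let t := pvTagB (PySem.List.pyGetD lines i "")
      (i, (t.1 == 2) && (match cur with | none => false | some last => decide (t.2 > last))) ::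
        emitRec lines rest (if t.1 = 0 then some t.2 else cur)

-- B's zip of the three staged lists is the fused single pass.
lemma b_fuse (lines : List String) : ∀ (js : List Int) (cur : Option Int),
    (js.zip (((js.map (fun i => pvTagB (PySem.List.pyGetD lines i ""))).zip
        (pvLasts (js.map (fun i => pvTagB (PySem.List.pyGetD lines i ""))) cur)))).map (fun p =>
      (p.1, (p.2.1.1 == 2) &&
        (match p.2.2 with | none => false | some last => decide (p.2.1.2 > last))))
      = emitRec lines js cur := by
  intro js
  induction js with
  | nil => intro cur; simp [emitRec]
  | cons i rest ih =>
      intro cur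
      rcases h : pvTagB (PySem.List.pyGetD lines i "") with ⟨k, ind⟩
      simp [emitRec, pvLasts, h, ih]

-- A's backward scan, as the value it computes at position i (proof device only).
def backIndent (lines : List String) (list_start i : Int) : Option Int :=
  ((PySem.List.pyRange (i - 1) (list_start - 1) (-1)).find?
      (fun j => is_list_item (PySem.List.pyGetD lines j ""))).map
    (fun j => count_leading_spaces (PySem.List.pyGetD lines j ""))

-- One step of the backward scan: scanning from i down equals looking at i then scanning from i-1.
lemma backIndent_succ (lines : List String) (list_start i : Int) (h : list_start ≤ i) :
    backIndent lines list_start (i + 1) =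
      if is_list_item (PySem.List.pyGetD lines i "") then
        some (count_leading_spaces (PySem.List.pyGetD lines i ""))
      else backIndent lines list_start i := by
  unfold backIndent
  rw [show i + 1 - 1 = i by ring,
      PySem.List.pyRange_neg_one_cons (a := i) (b := list_start - 1) (by omega)]
  simp [List.find?]
  split_ifs with hitem <;> simp [hitem]

-- Main invariant: A's fold over [a, b) equals the emitted tail of B's fused pass, provided the
-- running state equals A's backward-scan value at position a.
lemma fold_agree (lines : List String) (list_start : Int) :
    ∀ (n : Nat) (a b : Int) (res : List (Int × Bool)),
      list_start ≤ a → (b - a).toNat = n →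
      (PySem.List.pyRange a b 1).foldl (pvStepA lines list_start) res =
        res ++ emitRec lines (PySem.List.pyRange a b 1) (backIndent lines list_start a) := by
  intro n
  induction n with
  | zero =>
      intro a b res _ hn
      rw [PySem.List.pyRange_one_eq_nil (by omega)]
      simp [emitRec]
  | succ m ih =>
      intro a b res ha hn
      rw [PySem.List.pyRange_one_cons (by omega)]
      simp only [List.foldl_cons, emitRec]
      rw [pvTagB_eq (PySem.List.pyGetD lines a ""),
          ih (a + 1) b (pvStepA lines list_start res a) (by omega) (by omega),
          backIndent_succ lines list_start a ha]
      by_cases hitem : is_list_item (PySem.List.pyGetD lines a "")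
      · have hA : pvStepA lines list_start res a = res ++ [(a, false)] := by
          simp [pvStepA, hitem]
        rw [hA]
        simp [hitem]
      · by_cases hblank : PySem.Str.strip (PySem.List.pyGetD lines a "") = ""
        · have hA : pvStepA lines list_start res a = res ++ [(a, false)] := by
            simp [pvStepA, hitem, hblank]
          rw [hA]
          simp [hitem, hblank]
        · have hA : pvStepA lines list_start res a =
              res ++ [(a, match backIndent lines list_start a with
                          | none => false
                          | some p => decide (count_leading_spaces (PySem.List.pyGetD lines a "") > p))] := by
            simp [pvStepA, hitem, hblank, backIndent]
          rw [hA]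
          simp [hitem, hblank]

-- ===== VERDICT (by name: the statement is the Claim_ definition above) =====
theorem detect_continuation_lines_spec : Claim_equal_detect_continuation_lines := by
  intro lines list_start list_end _ _
  unfold Spec_detect_continuation_lines detect_continuation_lines detect_continuation_lines_alt
  rw [fold_agree lines list_start (list_end + 1 - list_start).toNat list_start (list_end + 1)
      [] le_rfl rfl]
  rw [show backIndent lines list_start list_start = none by
    unfold backIndent
    rw [PySem.List.pyRange_neg_one_eq_nil (by omega)]; simp]
  simp only [List.nil_append]
  exact (b_fuse lines (PySem.List.pyRange list_start (list_end + 1) 1) none).symm
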